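-- pv_equiv track=rewrite | github.com/kaiwensun/leetcode | 1001-1500/1196.How Many Apples Can You Put into the Basket.py | maxNumberOfApples
-- ===== SOURCE A (Python) =====
-- def maxNumberOfApples(arr):
--     """
--     :type arr: List[int]
--     :rtype: int
--     """
--     s = cnt = 0
--     for a in sorted(arr):
--         s += a
--         if s > 5000:
--             break
--         cnt += 1
--     return cnt
-- ===== SOURCE B (Python) =====
-- def maxNumberOfApples(arr):
--     freq = {}
--     for a in arr:
--         freq[a] = freq.get(a, 0) + 1
--     s = 0
--     total = 0
--     for w in sorted(freq):
--         c = freq[w]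
--         if w <= 0:
--             s += w * c
--             total += c
--         else:
--             take = (5000 - s) // w
--             if take < c:
--                 return total + take
--             s += w * c
--             total += c
--     return total
-- ===== Notes on version B (the rewrite author's own statement) =====
-- stated objective: alternative
-- what changed: Instead of sorting the whole list and adding apples one by one until the sum exceeds 5000, B builds a frequency dictionary, sorts only the distinct weights, and takes each weight group in bulk with a single floor division against the remaining capacity.
import Mathlib
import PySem

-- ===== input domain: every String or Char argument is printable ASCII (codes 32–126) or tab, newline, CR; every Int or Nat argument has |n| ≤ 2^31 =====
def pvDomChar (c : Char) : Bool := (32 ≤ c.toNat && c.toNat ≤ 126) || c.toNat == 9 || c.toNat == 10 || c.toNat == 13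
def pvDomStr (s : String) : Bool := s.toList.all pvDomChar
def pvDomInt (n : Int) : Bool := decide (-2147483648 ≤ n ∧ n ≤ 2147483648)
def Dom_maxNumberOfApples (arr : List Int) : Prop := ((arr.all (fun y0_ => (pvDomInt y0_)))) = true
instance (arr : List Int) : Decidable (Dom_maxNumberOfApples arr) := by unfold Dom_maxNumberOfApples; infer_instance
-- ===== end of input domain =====

-- B replaces A's sort-everything-then-scan with a frequency dict: only the distinct
-- weights are sorted and each group is taken in bulk with one division (objective: alternative).


-- ===== PORT A =====
-- A's for-loop with `break` over sorted(arr): state (s, cnt)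
def goA : List Int → Int → Int → Int
  | [], _, cnt => cnt
  | a :: rest, s, cnt =>
      let s' := s + a
      if s' > 5000 then cnt else goA rest s' (cnt + 1)

def maxNumberOfApples (arr : List Int) : Int :=
  goA (PySem.List.sorted arr (fun x => x) false) 0 0

-- ===== PORT B =====
-- B's loop over the sorted distinct weights: state (s, total); early return = stop
def goB (freq : PySem.Dict Int Int) : List Int → Int → Int → Int
  | [], _, total => total
  | w :: ws, s, total =>
      let c := freq.getD w 0
      if w ≤ 0 then goB freq ws (s + w * c) (total + c)
      else
        let take := PySem.Int.floordiv (5000 - s) w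
        if take < c then total + take
        else goB freq ws (s + w * c) (total + c)

def maxNumberOfApples_alt (arr : List Int) : Int :=
  let freq : PySem.Dict Int Int :=
    arr.foldl (fun d x => d.insert x (d.getD x 0 + 1)) PySem.Dict.empty
  goB freq (PySem.List.sorted freq.keys (fun x => x) false) 0 0

-- ===== PRECONDITION & SPEC =====
def Spec_maxNumberOfApples (arr : List Int) (out : Int) : Prop := out = maxNumberOfApples_alt arr
instance (arr : List Int) (out : Int) : Decidable (Spec_maxNumberOfApples arr out) := by unfold Spec_maxNumberOfApples; infer_instance

-- ===== CLAIM (what is proved, stated in full; the proofs are below) =====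
def Claim_equal_maxNumberOfApples : Prop := ∀ (arr : List Int), Dom_maxNumberOfApples arr → Spec_maxNumberOfApples arr (maxNumberOfApples arr)

-- ===== LEMMAS AND PROOFS =====

-- A group of c copies of a nonpositive weight is always fully taken by A's loop.
theorem goA_neg_group (w : Int) (hw : w ≤ 0) (c : Nat) :
    ∀ (rest : List Int) (s cnt : Int), s ≤ 5000 →
      goA (List.replicate c w ++ rest) s cnt = goA rest (s + w * c) (cnt + c) := by
  induction c with
  | zero => intro rest s cnt _; simp
  | succ c ih =>
      intro rest s cnt hs
      have hsw : s + w ≤ 5000 := by linarith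
      rw [List.replicate_succ, List.cons_append]
      have h1 : goA (w :: (List.replicate c w ++ rest)) s cnt
          = goA (List.replicate c w ++ rest) (s + w) (cnt + 1) := by
        simp only [goA]
        rw [if_neg (by linarith)]
      rw [h1, ih _ _ _ hsw]
      congr 1 <;> push_cast <;> ring

-- A group of c copies of a positive weight: A takes min(c, (5000-s)//w) copies.
theorem goA_pos_group (w : Int) (hw : 0 < w) (c : Nat) :
    ∀ (rest : List Int) (s cnt : Int), s ≤ 5000 →
      goA (List.replicate c w ++ rest) s cnt =
        if PySem.Int.floordiv (5000 - s) w < (c : Int) then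
          cnt + PySem.Int.floordiv (5000 - s) w
        else goA rest (s + w * c) (cnt + c) := by
  induction c with
  | zero =>
      intro rest s cnt hs
      have h0 : (0:Int) ≤ PySem.Int.floordiv (5000 - s) w := by
        rw [PySem.Int.le_floordiv_iff_mul_le hw]; linarith
      rw [if_neg (by exact_mod_cast not_lt.mpr h0)]
      simp
  | succ c ih =>
      intro rest s cnt hs
      rw [List.replicate_succ, List.cons_append]
      by_cases hbig : s + w > 5000
      · have h1 : goA (w :: (List.replicate c w ++ rest)) s cnt = cnt := by
          simp only [goA]; rw [if_pos (by linarith)]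
        have hq0 : PySem.Int.floordiv (5000 - s) w = 0 := by
          rw [PySem.Int.floordiv_eq_iff_of_pos hw]; constructor <;> linarith
        rw [h1, if_pos (by rw [hq0]; push_cast; positivity), hq0, add_zero]
      · have h1 : goA (w :: (List.replicate c w ++ rest)) s cnt
            = goA (List.replicate c w ++ rest) (s + w) (cnt + 1) := by
          simp only [goA]; rw [if_neg (by linarith)]
        set q := PySem.Int.floordiv (5000 - s) w with hqdef
        have hqb : q * w ≤ 5000 - s ∧ 5000 - s < (q + 1) * w :=
          (PySem.Int.floordiv_eq_iff_of_pos hw).mp hqdef.symm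
        have hq' : PySem.Int.floordiv (5000 - (s + w)) w = q - 1 := by
          rw [PySem.Int.floordiv_eq_iff_of_pos hw]
          have e1 : (q - 1) * w = q * w - w := by ring
          have e2 : (q - 1 + 1) * w = q * w := by ring
          constructor <;> [rw [e1]; rw [e2]] <;> linarith [hqb.1, hqb.2]
        rw [h1, ih _ _ _ (by linarith), hq']
        by_cases hc : q < (c:Int) + 1
        · rw [if_pos (by linarith), if_pos (by push_cast; linarith)]; ring
        · rw [if_neg (by linarith), if_neg (by push_cast; linarith)]
          congr 1 <;> push_cast <;> ring

-- goA over the grouped list equals goB over the key list (any key list).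
theorem goA_groups_eq_goB (arr : List Int) :
    ∀ (ks : List Int) (s total : Int), s ≤ 5000 →
      goA (ks.flatMap (fun w => List.replicate (arr.count w) w)) s total =
        goB (PySem.Dict.counter arr) ks s total := by
  intro ks
  induction ks with
  | nil => intro s total _; simp [goB, goA]
  | cons w ks ih =>
      intro s total hs
      rw [List.flatMap_cons]
      simp only [goB, PySem.Dict.getD_counter]
      by_cases hw : w ≤ 0
      · rw [if_pos hw, goA_neg_group w hw _ _ _ _ hs,
          ih _ _ (by nlinarith [Int.natCast_nonneg (arr.count w)])]
      · have hw' : (0:Int) < w := by linarith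
        rw [if_neg hw, goA_pos_group w hw' _ _ _ _ hs]
        by_cases ht : PySem.Int.floordiv (5000 - s) w < (arr.count w : Int)
        · rw [if_pos ht, if_pos ht]
        · rw [if_neg ht, if_neg ht]
          have hle : (arr.count w : Int) * w ≤ 5000 - s := by
            rw [← PySem.Int.le_floordiv_iff_mul_le hw']; linarith
          exact ih _ _ (by linarith)

theorem count_flatMap_replicate (arr : List Int) (a : Int) :
    ∀ ks : List Int, ks.Nodup →
      (ks.flatMap (fun w => List.replicate (arr.count w) w)).count a =
        if a ∈ ks then arr.count a else 0 := by
  intro ks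
  induction ks with
  | nil => simp
  | cons w ks ih =>
      intro hnd
      rw [List.flatMap_cons, List.count_append, List.count_replicate,
        ih hnd.of_cons]
      by_cases haw : a = w
      · subst haw
        have : a ∉ ks := (List.nodup_cons.mp hnd).1
        simp [this]
      · simp [haw, Ne.symm haw, List.mem_cons]

theorem pairwise_le_flatMap_replicate (arr : List Int) (ks : List Int)
    (h : ks.Pairwise (· < ·)) :
    (ks.flatMap (fun w => List.replicate (arr.count w) w)).Pairwise (· ≤ ·) := by
  rw [List.pairwise_flatMap]
  constructor
  · intro w _; exact List.pairwise_replicate.mpr (Or.inr (le_refl w))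
  · exact h.imp_of_mem (by
      intro a b _ _ hab x hx y hy
      rw [List.eq_of_mem_replicate hx, List.eq_of_mem_replicate hy]
      exact le_of_lt hab)

-- sorted(arr) is the concatenation of the constant blocks over sorted(set(arr)).
theorem sorted_eq_flatMap (arr : List Int) :
    PySem.List.sorted arr (fun x => x) false =
      (PySem.List.sorted (PySem.Set.ofList arr) (fun x => x) false).flatMap
        (fun w => List.replicate (arr.count w) w) := by
  have hlt : (PySem.List.sorted (PySem.Set.ofList arr) (fun x => x) false).Pairwise (· < ·) :=
    PySem.List.sorted_ofList_pairwise_lt arr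
  have hnd : (PySem.List.sorted (PySem.Set.ofList arr) (fun x => x) false).Nodup :=
    hlt.imp ne_of_lt
  have hmem : ∀ a : Int, a ∈ PySem.List.sorted (PySem.Set.ofList arr) (fun x => x) false ↔ a ∈ arr := by
    intro a; rw [PySem.List.mem_sorted, PySem.Set.mem_ofList]
  apply PySem.List.sorted_id_eq_of_perm_of_pairwise
  · rw [List.perm_iff_count]
    intro a
    rw [count_flatMap_replicate arr a _ hnd]
    by_cases ha : a ∈ arr
    · rw [if_pos ((hmem a).mpr ha)]
    · rw [if_neg (fun h => ha ((hmem a).mp h)), eq_comm, List.count_eq_zero]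
      exact ha
  · exact pairwise_le_flatMap_replicate arr _ hlt

-- ===== VERDICT (by name: the statement is the Claim_ definition above) =====
theorem maxNumberOfApples_spec : Claim_equal_maxNumberOfApples := by
  intro arr _
  show maxNumberOfApples arr = maxNumberOfApples_alt arr
  have halt : maxNumberOfApples_alt arr =
      goB (PySem.Dict.counter arr)
        (PySem.List.sorted (PySem.Set.ofList arr) (fun x => x) false) 0 0 := by
    rw [show maxNumberOfApples_alt arr =
        goB (PySem.Dict.counter arr)
          (PySem.List.sorted (PySem.Dict.counter arr).keys (fun x => x) false) 0 0 from rfl,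
      PySem.Dict.keys_counter]
  rw [halt, show maxNumberOfApples arr = goA (PySem.List.sorted arr (fun x => x) false) 0 0 from rfl,
    sorted_eq_flatMap, goA_groups_eq_goB arr _ 0 0 (by norm_num)]
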